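-- pv_equiv track=rewrite | github.com/liushufeng007/SeatControl_BT | Src/Driverif/cal_canfilter.py | Get_mask_filter
-- ===== SOURCE A (Python) =====
-- def Get_mask_filter(data1,data2,mask,filter):
--     table = {
--         0: 0x001,
--         1: 0x002,
--         2: 0x004,
--         3: 0x008,
--
--         4: 0x010,
--         5: 0x020,
--         6: 0x040,
--         7: 0x080,
--
--         8: 0x100,
--         9: 0x200,
--         10:0x400,
--     }
--
--
--
--     for key in table:
--         if table[key] & data1 == table[key] & data2:
--             if table[key] & data1 == 0:
--                 filter = filter & ~table[key];
--             else:
--                 pass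
--         else:
--             mask = mask & ~table[key];
--             filter = filter & ~table[key];
--
--
--     return mask,filter
-- ===== SOURCE B (Python) =====
-- def Get_mask_filter(data1, data2, mask, filter):
--     diff = (data1 ^ data2) & 0x7FF
--     clear_filter = ~(data1 & data2) & 0x7FF
--     return mask & ~diff, filter & ~clear_filter
-- ===== Notes on version B (the rewrite author's own statement) =====
-- stated objective: simpler
-- what changed: Replaces the 11-iteration per-bit table loop with three closed-form bitwise expressions: mask is cleared on (data1^data2)&0x7FF and filter on ~(data1&data2)&0x7FF.
import Mathlib
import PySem

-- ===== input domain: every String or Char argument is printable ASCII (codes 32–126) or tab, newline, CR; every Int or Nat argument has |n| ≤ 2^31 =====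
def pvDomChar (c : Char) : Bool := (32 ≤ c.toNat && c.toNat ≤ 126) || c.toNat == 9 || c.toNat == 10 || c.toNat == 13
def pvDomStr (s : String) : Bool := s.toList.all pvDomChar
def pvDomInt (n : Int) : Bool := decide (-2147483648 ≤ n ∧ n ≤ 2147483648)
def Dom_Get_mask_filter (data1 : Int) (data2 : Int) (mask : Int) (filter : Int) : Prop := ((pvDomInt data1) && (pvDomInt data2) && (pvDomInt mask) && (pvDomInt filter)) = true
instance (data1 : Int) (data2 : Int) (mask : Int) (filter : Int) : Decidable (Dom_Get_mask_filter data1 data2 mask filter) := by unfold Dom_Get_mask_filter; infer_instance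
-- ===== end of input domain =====

-- B replaces A's 11-iteration per-bit table loop by closed-form bitwise expressions (objective: simpler).
-- Int.land / Int.lor / Int.xor / Int.lnot are Python's & | ^ ~ (exact two's-complement semantics, also on negatives).

-- ===== PORT A =====
-- the literal dict `table` from A
def pvTable : PySem.Dict Int Int :=
  PySem.Dict.ofList [(0, 0x001), (1, 0x002), (2, 0x004), (3, 0x008),
                     (4, 0x010), (5, 0x020), (6, 0x040), (7, 0x080),
                     (8, 0x100), (9, 0x200), (10, 0x400)]

-- one iteration of A's `for key in table` loop body; state = (mask, filter).
-- `table[key]` ported as `(pvTable.get? key).getD 0`: every iterated key is a key of the dict, so the lookup never misses and getD is exact here.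
def pvStepA (data1 data2 : Int) (st : Int × Int) (key : Int) : Int × Int :=
  let t := (pvTable.get? key).getD 0
  if Int.land t data1 = Int.land t data2 then
    if Int.land t data1 = 0 then (st.1, Int.land st.2 (Int.lnot t)) else st
  else (Int.land st.1 (Int.lnot t), Int.land st.2 (Int.lnot t))

def Get_mask_filter (data1 : Int) (data2 : Int) (mask : Int) (filter : Int) : Int × Int :=
  pvTable.keys.foldl (pvStepA data1 data2) (mask, filter)

-- ===== PORT B =====
def Get_mask_filter_alt (data1 : Int) (data2 : Int) (mask : Int) (filter : Int) : Int × Int :=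
  let diff := Int.land (Int.xor data1 data2) 0x7FF
  let clearFilter := Int.land (Int.lnot (Int.land data1 data2)) 0x7FF
  (Int.land mask (Int.lnot diff), Int.land filter (Int.lnot clearFilter))

-- ===== PRECONDITION & SPEC =====
def Spec_Get_mask_filter (data1 : Int) (data2 : Int) (mask : Int) (filter : Int) (out : Int × Int) : Prop := out = Get_mask_filter_alt data1 data2 mask filter
instance (data1 : Int) (data2 : Int) (mask : Int) (filter : Int) (out : Int × Int) : Decidable (Spec_Get_mask_filter data1 data2 mask filter out) := by unfold Spec_Get_mask_filter; infer_instance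

-- ===== CLAIM (what is proved, stated in full; the proofs are below) =====
def Claim_equal_Get_mask_filter : Prop := ∀ (data1 : Int) (data2 : Int) (mask : Int) (filter : Int), Dom_Get_mask_filter data1 data2 mask filter → Spec_Get_mask_filter data1 data2 mask filter (Get_mask_filter data1 data2 mask filter)

-- ===== LEMMAS AND PROOFS =====

theorem pvTestBit_zero (k : Nat) : (0 : Int).testBit k = false := by
  show (Int.ofNat 0).testBit k = false
  simp [Int.testBit]

theorem pvTestBit_pow (j k : Nat) : ((2 : Int) ^ j).testBit k = decide (j = k) := by
  have h : ((2 : Int) ^ j) = ((2 ^ j : Nat) : Int) := by push_cast; ring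
  rw [h]
  show (Int.ofNat (2 ^ j)).testBit k = decide (j = k)
  simp [Int.testBit, Nat.testBit_two_pow]

-- extensionality for Int by bits
theorem pvExt (m n : Int) (h : ∀ k, m.testBit k = n.testBit k) : m = n := by
  have hbig : ∀ a b : Nat, a.testBit (a + b + 1) = false := by
    intro a b
    apply Nat.testBit_lt_two_pow
    calc a < 2 ^ a := Nat.lt_two_pow_self
    _ ≤ 2 ^ (a + b + 1) := Nat.pow_le_pow_right (by norm_num) (by omega)
  cases m with
  | ofNat a =>
    cases n with
    | ofNat b =>
      have : a = b := Nat.eq_of_testBit_eq (fun k => by simpa [Int.testBit] using h k)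
      simp [this]
    | negSucc b =>
      exfalso
      have hk := h (a + b + 1)
      have hb : b.testBit (a + b + 1) = false := by
        have := hbig b a
        simpa [Nat.add_comm, Nat.add_left_comm, Nat.add_assoc] using this
      simp [Int.testBit, hbig a b, hb] at hk
  | negSucc a =>
    cases n with
    | ofNat b =>
      exfalso
      have hk := h (a + b + 1)
      have hb : b.testBit (a + b + 1) = false := by
        have := hbig b a
        simpa [Nat.add_comm, Nat.add_left_comm, Nat.add_assoc] using this
      simp [Int.testBit, hbig a b, hb] at hk
    | negSucc b =>
      have : a = b := Nat.eq_of_testBit_eq (fun k => by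
        have hk := h k
        simp [Int.testBit] at hk
        exact hk)
      simp [this]

theorem pvAndZero (x : Int) : Int.land x 0 = 0 := by
  apply pvExt; intro k
  simp [Int.testBit_land, pvTestBit_zero]

theorem pvAndNotZero (x : Int) : Int.land x (Int.lnot 0) = x := by
  apply pvExt; intro k
  simp [Int.testBit_land, Int.testBit_lnot, pvTestBit_zero]

theorem pvAndPow (x : Int) (j : Nat) :
    Int.land x ((2 : Int) ^ j) = if x.testBit j then (2 : Int) ^ j else 0 := by
  apply pvExt; intro k
  by_cases h : x.testBit j
  · by_cases hk : j = k
    · subst hk; simp [Int.testBit_land, pvTestBit_pow, h]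
    · simp [Int.testBit_land, pvTestBit_pow, pvTestBit_zero, h, hk]
  · by_cases hk : j = k
    · subst hk; simp [Int.testBit_land, pvTestBit_pow, pvTestBit_zero, h]
    · simp [Int.testBit_land, pvTestBit_pow, pvTestBit_zero, h, hk]

theorem pvPowAnd (x : Int) (j : Nat) :
    Int.land ((2 : Int) ^ j) x = if x.testBit j then (2 : Int) ^ j else 0 := by
  rw [← pvAndPow]
  apply pvExt; intro k
  simp [Int.testBit_land, Bool.and_comm]

theorem pvMerge (m x a b : Int) :
    Int.land (Int.land m (Int.lnot (Int.land x a))) (Int.lnot (Int.land x b))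
      = Int.land m (Int.lnot (Int.land x (Int.lor a b))) := by
  apply pvExt; intro k
  simp only [Int.testBit_land, Int.testBit_lnot, Int.testBit_lor]
  cases m.testBit k <;> cases x.testBit k <;> cases a.testBit k <;> cases b.testBit k <;> rfl

-- one loop iteration of A, when the table value is the single bit 2^j, in closed form
theorem pvStepA_pow (d1 d2 m f : Int) (key : Int) (j : Nat)
    (hj : (pvTable.get? key).getD 0 = (2 : Int) ^ j) :
    pvStepA d1 d2 (m, f) key
      = (Int.land m (Int.lnot (Int.land (Int.xor d1 d2) ((2 : Int) ^ j))),
         Int.land f (Int.lnot (Int.land (Int.lnot (Int.land d1 d2)) ((2 : Int) ^ j)))) := by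
  have hpow : (0 : Int) < 2 ^ j := by positivity
  simp only [pvStepA, hj]
  by_cases h1 : d1.testBit j <;> by_cases h2 : d2.testBit j <;>
    simp [pvPowAnd, pvAndPow, Int.testBit_lxor, Int.testBit_lnot, Int.testBit_land,
          h1, h2, hpow.ne, hpow.ne', pvAndNotZero]

-- the or of the table values along a key list
def pvOr : List Int → Int
  | [] => 0
  | key :: L => Int.lor ((pvTable.get? key).getD 0) (pvOr L)

theorem pvFoldA (d1 d2 : Int) (L : List Int)
    (hL : ∀ key ∈ L, ∃ j : Nat, (pvTable.get? key).getD 0 = (2 : Int) ^ j) :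
    ∀ m f : Int, L.foldl (pvStepA d1 d2) (m, f)
      = (Int.land m (Int.lnot (Int.land (Int.xor d1 d2) (pvOr L))),
         Int.land f (Int.lnot (Int.land (Int.lnot (Int.land d1 d2)) (pvOr L)))) := by
  induction L with
  | nil =>
    intro m f
    simp [pvOr, pvAndZero, pvAndNotZero]
  | cons key L ih =>
    intro m f
    obtain ⟨j, hj⟩ := hL key (List.mem_cons_self ..)
    have hL' : ∀ k ∈ L, ∃ j : Nat, (pvTable.get? k).getD 0 = (2 : Int) ^ j :=
      fun k hk => hL k (List.mem_cons_of_mem _ hk)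
    rw [List.foldl_cons, pvStepA_pow d1 d2 m f key j hj, ih hL']
    show _ = (Int.land m (Int.lnot (Int.land _ (pvOr (key :: L)))), _)
    rw [pvOr, hj, ← pvMerge, ← pvMerge]

-- ===== VERDICT (by name: the statement is the Claim_ definition above) =====
theorem Get_mask_filter_spec : Claim_equal_Get_mask_filter := by
  intro d1 d2 m f _
  unfold Spec_Get_mask_filter
  show Get_mask_filter d1 d2 m f = _
  unfold Get_mask_filter Get_mask_filter_alt
  have hkeys : pvTable.keys = [0, 1, 2, 3, 4, 5, 6, 7, 8, 9, 10] := by decide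
  have hor : pvOr [0, 1, 2, 3, 4, 5, 6, 7, 8, 9, 10] = 2047 := by decide
  have hL : ∀ key ∈ ([0, 1, 2, 3, 4, 5, 6, 7, 8, 9, 10] : List Int),
      ∃ j : Nat, (pvTable.get? key).getD 0 = (2 : Int) ^ j := by
    intro key hk
    fin_cases hk
    exacts [⟨0, by rw [pow_zero]; decide⟩,
            ⟨1, by rw [pow_one]; decide⟩,
            ⟨2, by rw [show ((2:Int)^2) = 4 by norm_num]; decide⟩,
            ⟨3, by rw [show ((2:Int)^3) = 8 by norm_num]; decide⟩,
            ⟨4, by rw [show ((2:Int)^4) = 16 by norm_num]; decide⟩,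
            ⟨5, by rw [show ((2:Int)^5) = 32 by norm_num]; decide⟩,
            ⟨6, by rw [show ((2:Int)^6) = 64 by norm_num]; decide⟩,
            ⟨7, by rw [show ((2:Int)^7) = 128 by norm_num]; decide⟩,
            ⟨8, by rw [show ((2:Int)^8) = 256 by norm_num]; decide⟩,
            ⟨9, by rw [show ((2:Int)^9) = 512 by norm_num]; decide⟩,
            ⟨10, by rw [show ((2:Int)^10) = 1024 by norm_num]; decide⟩]
  rw [hkeys, pvFoldA d1 d2 _ hL m f, hor]
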